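-- pv_equiv track=rewrite | github.com/frankyanfu/item_rendering_check | table.py | _cell_diffs
-- ===== SOURCE A (Python) =====
-- from typing import Optional, List, Tuple
--
-- def _cell_diffs(cells1: List[List[str]], cells2: List[List[str]]) -> List[Tuple]:
--     diffs = []
--     max_r = max(len(cells1), len(cells2))
--     max_c = max((len(r) for r in cells1 + cells2), default=0)
--     for r in range(max_r):
--         for c in range(max_c):
--             v1 = cells1[r][c] if r < len(cells1) and c < len(cells1[r]) else ''
--             v2 = cells2[r][c] if r < len(cells2) and c < len(cells2[r]) else ''
--             if v1 != v2:
--                 diffs.append((r, c, v1, v2))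
--     return diffs
-- ===== SOURCE B (Python) =====
-- from typing import List, Tuple
--
-- def _cell_diffs(cells1: List[List[str]], cells2: List[List[str]]) -> List[Tuple]:
--     m1 = {(r, c): v for r, row in enumerate(cells1) for c, v in enumerate(row)}
--     m2 = {(r, c): v for r, row in enumerate(cells2) for c, v in enumerate(row)}
--     diffs = []
--     for pos in sorted(m1.keys() | m2.keys()):
--         v1 = m1.get(pos, '')
--         v2 = m2.get(pos, '')
--         if v1 != v2:
--             diffs.append((pos[0], pos[1], v1, v2))
--     return diffs
-- ===== Notes on version B (the rewrite author's own statement) =====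
-- stated objective: alternative
-- what changed: A scans every (r,c) of the bounding rectangle with nested bounds-checked index loops; B builds two (row,col)->value dicts from the actual cells and does one pass over the sorted union of their key sets, defaulting missing positions to ''.
import Mathlib
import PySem

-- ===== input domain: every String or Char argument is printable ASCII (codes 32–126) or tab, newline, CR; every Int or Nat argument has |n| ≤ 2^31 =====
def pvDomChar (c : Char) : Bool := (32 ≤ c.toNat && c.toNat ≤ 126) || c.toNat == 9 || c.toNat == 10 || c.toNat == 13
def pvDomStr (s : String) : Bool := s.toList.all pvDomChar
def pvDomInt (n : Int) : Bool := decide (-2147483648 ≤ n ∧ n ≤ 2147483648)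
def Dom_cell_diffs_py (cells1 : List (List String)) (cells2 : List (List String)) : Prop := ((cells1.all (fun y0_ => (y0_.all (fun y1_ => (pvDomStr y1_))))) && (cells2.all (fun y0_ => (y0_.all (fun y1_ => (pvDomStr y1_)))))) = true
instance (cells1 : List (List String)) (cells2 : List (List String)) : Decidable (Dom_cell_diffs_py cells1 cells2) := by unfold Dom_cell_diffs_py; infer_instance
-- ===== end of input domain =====

-- B replaces A's bounds-checked scan of the full bounding rectangle by two (row,col)→value dicts
-- and one pass over the sorted union of their key sets (alternative decomposition; same results).

-- ===== PORT A =====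
def cell_diffs_py (cells1 : List (List String)) (cells2 : List (List String)) : List (Int × Int × String × String) :=
  let max_r : Int := max (cells1.length : Int) (cells2.length : Int)
  let max_c : Int := PySem.List.maxD ((cells1 ++ cells2).map (fun r => (r.length : Int))) (fun x => x) 0
  List.foldl (fun diffs r =>
      List.foldl (fun diffs c =>
          let v1 := if r < (cells1.length : Int) ∧ c < ((PySem.List.pyGetD cells1 r []).length : Int)
                    then PySem.List.pyGetD (PySem.List.pyGetD cells1 r []) c "" else ""
          let v2 := if r < (cells2.length : Int) ∧ c < ((PySem.List.pyGetD cells2 r []).length : Int)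
                    then PySem.List.pyGetD (PySem.List.pyGetD cells2 r []) c "" else ""
          if v1 ≠ v2 then diffs ++ [(r, c, v1, v2)] else diffs)
        diffs (PySem.List.pyRange 0 max_c 1))
    [] (PySem.List.pyRange 0 max_r 1)

-- ===== PORT B =====
-- {(r, c): v for r, row in enumerate(cells)  for c, v in enumerate(row)}
def buildMap (cells : List (List String)) : PySem.Dict (Int × Int) String :=
  List.foldl (fun d rw =>
      List.foldl (fun d cv => d.insert (rw.1, cv.1) cv.2) d (PySem.List.enumerate rw.2 0))
    PySem.Dict.empty (PySem.List.enumerate cells 0)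

def cell_diffs_py_alt (cells1 : List (List String)) (cells2 : List (List String)) : List (Int × Int × String × String) :=
  let m1 := buildMap cells1
  let m2 := buildMap cells2
  let ks := PySem.List.sorted2 (PySem.Set.union (PySem.Set.ofList m1.keys) m2.keys) (fun p => p.1) (fun p => p.2)
  List.foldl (fun diffs pos =>
      let v1 := m1.getD pos ""
      let v2 := m2.getD pos ""
      if v1 ≠ v2 then diffs ++ [(pos.1, pos.2, v1, v2)] else diffs)
    [] ks

-- ===== PRECONDITION & SPEC =====
def Spec_cell_diffs_py (cells1 : List (List String)) (cells2 : List (List String)) (out : List (Int × Int × String × String)) : Prop := out = cell_diffs_py_alt cells1 cells2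
instance (cells1 : List (List String)) (cells2 : List (List String)) (out : List (Int × Int × String × String)) : Decidable (Spec_cell_diffs_py cells1 cells2 out) := by unfold Spec_cell_diffs_py; infer_instance

-- ===== CLAIM (what is proved, stated in full; the proofs are below) =====
def Claim_equal_cell_diffs_py : Prop := ∀ (cells1 : List (List String)) (cells2 : List (List String)), Dom_cell_diffs_py cells1 cells2 → Spec_cell_diffs_py cells1 cells2 (cell_diffs_py cells1 cells2)

-- ===== LEMMAS AND PROOFS =====

-- proof-side abbreviations for the quantities the two ports compute
def maxRp (c1 c2 : List (List String)) : Int := max (c1.length : Int) (c2.length : Int)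
def maxCp (c1 c2 : List (List String)) : Int :=
  PySem.List.maxD ((c1 ++ c2).map (fun r => (r.length : Int))) (fun x => x) 0
def allPos (c1 c2 : List (List String)) : List (Int × Int) :=
  (PySem.List.pyRange 0 (maxRp c1 c2) 1).flatMap
    (fun r => (PySem.List.pyRange 0 (maxCp c1 c2) 1).map (fun c => (r, c)))
def posList (cells : List (List String)) (s : Int) : List (Int × Int) :=
  (PySem.List.enumerate cells s).flatMap
    (fun rw => (PySem.List.enumerate rw.2 0).map (fun cv => (rw.1, cv.1)))
def pairsList (cells : List (List String)) (s : Int) : List ((Int × Int) × String) :=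
  (PySem.List.enumerate cells s).flatMap
    (fun rw => (PySem.List.enumerate rw.2 0).map (fun cv => ((rw.1, cv.1), cv.2)))
def inB (cells : List (List String)) (p : Int × Int) : Prop :=
  0 ≤ p.1 ∧ p.1 < (cells.length : Int) ∧ 0 ≤ p.2 ∧ p.2 < ((cells.getD p.1.toNat []).length : Int)
def V (cells : List (List String)) (p : Int × Int) : String := (buildMap cells).getD p ""
def Ukeys (c1 c2 : List (List String)) : List (Int × Int) :=
  PySem.Set.union (PySem.Set.ofList (buildMap c1).keys) (buildMap c2).keys

theorem items_build_aux (cells : List (List String)) (s : Int)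
    (d : PySem.Dict (Int × Int) String) (hd : ∀ q ∈ d.items, q.1.1 < s) :
    (List.foldl (fun d rw =>
        List.foldl (fun d cv => d.insert (rw.1, cv.1) cv.2) d (PySem.List.enumerate rw.2 0))
      d (PySem.List.enumerate cells s)).items = d.items ++ pairsList cells s := by
  induction cells generalizing s d with
  | nil => simp [pairsList, PySem.List.enumerate_nil]
  | cons row rest ih =>
    rw [PySem.List.enumerate_cons]
    simp only [List.foldl_cons]
    have hfresh : ∀ cv ∈ PySem.List.enumerate row 0,
        d.contains ((s : Int), cv.1) = false := by
      intro cv _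
      rw [Bool.eq_false_iff]
      intro hc
      rw [PySem.Dict.contains_iff_mem_keys] at hc
      simp only [PySem.Dict.keys, List.mem_map] at hc
      obtain ⟨q, hq, hq2⟩ := hc
      have := hd q hq
      rw [hq2] at this
      simp at this
    have hnd : ((PySem.List.enumerate row 0).map
        (fun cv => ((s : Int), cv.1))).Nodup := by
      exact (PySem.List.pairwise_lt_enumerate row 0).map _
        (fun a b hab => by simp; omega)
    have hinner := PySem.Dict.items_foldl_insert_fresh (PySem.List.enumerate row 0)
      (fun cv => ((s : Int), cv.1)) (fun cv => cv.2) d hfresh hnd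
    beta_reduce at hinner
    have hkeys : ∀ q ∈ (List.foldl (fun d cv => d.insert ((s : Int), cv.1) cv.2) d
        (PySem.List.enumerate row 0)).items, q.1.1 < s + 1 := by
      intro q hq
      rw [hinner] at hq
      rcases List.mem_append.1 hq with h | h
      · have := hd q h; omega
      · simp only [List.mem_map] at h
        obtain ⟨cv, _, rfl⟩ := h
        simp
    rw [ih (s+1) _ hkeys, hinner]
    simp [pairsList, PySem.List.enumerate_cons, List.append_assoc]

theorem items_build (cells : List (List String)) :
    (buildMap cells).items = pairsList cells 0 := by
  have := items_build_aux cells 0 PySem.Dict.empty (by simp [PySem.Dict.empty])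
  simpa [buildMap, PySem.Dict.empty] using this

theorem keys_build (cells : List (List String)) :
    (buildMap cells).keys = posList cells 0 := by
  simp only [PySem.Dict.keys, items_build, posList, pairsList, List.map_flatMap]
  exact List.flatMap_congr (fun rw _ => by simp)

theorem mem_posList (cells : List (List String)) (s : Int) (p : Int × Int) :
    p ∈ posList cells s ↔
      ∃ k : Nat, ∃ _ : k < cells.length, p.1 = s + k ∧
        ∃ j : Nat, ∃ _ : j < (cells.getD k []).length, p.2 = (j : Int) := by
  simp only [posList, List.mem_flatMap, PySem.List.mem_enumerate_iff, List.mem_map]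
  constructor
  · rintro ⟨rw, ⟨k, hk, rfl⟩, cv, ⟨j, hj, rfl⟩, rfl⟩
    exact ⟨k, hk, rfl, j, by simpa [List.getD_eq_getElem?_getD, List.getElem?_eq_getElem hk] using hj, by simp⟩
  · rintro ⟨k, hk, h1, j, hj, h2⟩
    have hj' : j < cells[k].length := by
      simpa [List.getD_eq_getElem?_getD, List.getElem?_eq_getElem hk] using hj
    refine ⟨(s + k, cells[k]), ⟨k, hk, rfl⟩, (j, cells[k][j]), ⟨j, hj', by simp⟩, ?_⟩
    cases p; simp_all

theorem mem_posList_zero (cells : List (List String)) (p : Int × Int) :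
    p ∈ posList cells 0 ↔ inB cells p := by
  rw [mem_posList]
  unfold inB
  constructor
  · rintro ⟨k, hk, h1, j, hj, h2⟩
    refine ⟨by omega, by omega, by omega, ?_⟩
    have : p.1.toNat = k := by omega
    rw [this, h2]
    exact_mod_cast hj
  · rintro ⟨h0, h1, h2, h3⟩
    refine ⟨p.1.toNat, by omega, by omega, p.2.toNat, by omega, by omega⟩

theorem pairwise_posList (cells : List (List String)) (s : Int) :
    (posList cells s).Pairwise (fun a b => (toLex a : Lex (Int × Int)) < toLex b) := by
  unfold posList
  rw [List.pairwise_flatMap]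
  constructor
  · intro rw _
    exact (PySem.List.pairwise_lt_enumerate rw.2 0).map _
      (fun a b hab => by rw [Prod.Lex.lt_iff]; right; exact ⟨rfl, hab⟩)
  · refine (PySem.List.pairwise_lt_enumerate cells s).imp ?_
    rintro a b hab x hx y hy
    simp only [List.mem_map] at hx hy
    obtain ⟨cv, _, rfl⟩ := hx
    obtain ⟨cw, _, rfl⟩ := hy
    rw [Prod.Lex.lt_iff]; left; exact hab

theorem nodup_keys_build (cells : List (List String)) : (buildMap cells).keys.Nodup := by
  rw [keys_build]
  exact (pairwise_posList cells 0).imp (fun h => by rintro rfl; exact lt_irrefl _ h)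

theorem getD_build_in (cells : List (List String)) (p : Int × Int) (h : inB cells p) :
    V cells p = (cells.getD p.1.toNat []).getD p.2.toNat "" := by
  obtain ⟨h0, h1, h2, h3⟩ := h
  have hk : p.1.toNat < cells.length := by omega
  have hj : p.2.toNat < cells[p.1.toNat].length := by
    have : cells.getD p.1.toNat [] = cells[p.1.toNat] := by
      simp [List.getD_eq_getElem?_getD, List.getElem?_eq_getElem hk]
    rw [this] at h3; omega
  have hmem : ((p, cells[p.1.toNat][p.2.toNat]) : (Int × Int) × String) ∈ (buildMap cells).items := by
    rw [items_build]
    simp only [pairsList, List.mem_flatMap, PySem.List.mem_enumerate_iff, List.mem_map]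
    refine ⟨(p.1, cells[p.1.toNat]), ⟨p.1.toNat, hk, by simp; omega⟩,
      (p.2, cells[p.1.toNat][p.2.toNat]), ⟨p.2.toNat, hj, by simp; omega⟩, by simp⟩
  have := PySem.Dict.getD_of_mem_items _ hmem (nodup_keys_build cells) ""
  rw [V, this]
  simp [List.getD_eq_getElem?_getD, List.getElem?_eq_getElem hk, List.getElem?_eq_getElem hj]

theorem getD_build_out (cells : List (List String)) (p : Int × Int) (h : ¬ inB cells p) :
    V cells p = "" := by
  refine PySem.Dict.getD_of_not_contains _ _ ?_
  rw [Bool.eq_false_iff]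
  intro hc
  rw [PySem.Dict.contains_iff_mem_keys, keys_build, mem_posList_zero] at hc
  exact h hc

theorem mem_allPos (c1 c2 : List (List String)) (p : Int × Int) :
    p ∈ allPos c1 c2 ↔ 0 ≤ p.1 ∧ p.1 < maxRp c1 c2 ∧ 0 ≤ p.2 ∧ p.2 < maxCp c1 c2 := by
  unfold allPos
  simp only [List.mem_flatMap, List.mem_map, PySem.List.mem_pyRange_one]
  constructor
  · rintro ⟨r, hr, c, hc, rfl⟩
    exact ⟨hr.1, hr.2, hc.1, hc.2⟩
  · rintro ⟨h0, h1, h2, h3⟩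
    exact ⟨p.1, ⟨h0, h1⟩, p.2, ⟨h2, h3⟩, by simp⟩

theorem pairwise_allPos (c1 c2 : List (List String)) :
    (allPos c1 c2).Pairwise (fun a b => (toLex a : Lex (Int × Int)) < toLex b) := by
  unfold allPos
  rw [List.pairwise_flatMap]
  constructor
  · intro r _
    exact (PySem.List.pairwise_lt_pyRange_one 0 (maxCp c1 c2)).map _
      (fun a b hab => by rw [Prod.Lex.lt_iff]; right; exact ⟨rfl, hab⟩)
  · refine (PySem.List.pairwise_lt_pyRange_one 0 (maxRp c1 c2)).imp ?_
    rintro a b hab x hx y hy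
    simp only [List.mem_map] at hx hy
    obtain ⟨cv, _, rfl⟩ := hx
    obtain ⟨cw, _, rfl⟩ := hy
    rw [Prod.Lex.lt_iff]; left; exact hab

theorem sorted2_eq_sorted_lex (xs : List (Int × Int)) :
    PySem.List.sorted2 xs (fun p => p.1) (fun p => p.2) =
      PySem.List.sorted xs (fun p => (toLex p : Lex (Int × Int))) := by
  show List.foldl _ [] xs = List.foldl _ [] xs
  congr 1
  funext acc x
  congr 1
  funext a b
  simp only [Bool.false_eq_true, if_false]
  by_cases h1 : a.1 < b.1 <;> by_cases h2 : b.1 < a.1 <;> by_cases h3 : a.2 < b.2 <;>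
    simp [h1, h2, h3, Prod.Lex.lt_iff, ofLex_toLex] <;> omega

theorem mem_Ukeys (c1 c2 : List (List String)) (p : Int × Int) :
    p ∈ Ukeys c1 c2 ↔ inB c1 p ∨ inB c2 p := by
  unfold Ukeys
  rw [PySem.Set.mem_union, PySem.Set.mem_ofList, keys_build, keys_build,
    mem_posList_zero, mem_posList_zero]

theorem inB_mem_allPos (c1 c2 : List (List String)) (p : Int × Int)
    (h : inB c1 p ∨ inB c2 p) : p ∈ allPos c1 c2 := by
  rw [mem_allPos]
  have key : ∀ cells : List (List String), cells = c1 ∨ cells = c2 → inB cells p →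
      0 ≤ p.1 ∧ p.1 < maxRp c1 c2 ∧ 0 ≤ p.2 ∧ p.2 < maxCp c1 c2 := by
    rintro cells hc ⟨h0, h1, h2, h3⟩
    have hk : p.1.toNat < cells.length := by omega
    have hmem : ((cells.getD p.1.toNat []).length : Int) ∈
        ((c1 ++ c2).map (fun r => (r.length : Int))) := by
      rw [List.mem_map]
      refine ⟨cells.getD p.1.toNat [], ?_, rfl⟩
      rw [List.getD_eq_getElem?_getD, List.getElem?_eq_getElem hk]
      rcases hc with rfl | rfl
      · exact List.mem_append_left _ (List.getElem_mem _)
      · exact List.mem_append_right _ (List.getElem_mem _)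
    have hle := PySem.List.le_maxD_id _ 0 _ hmem
    have hr : p.1 < maxRp c1 c2 := by
      unfold maxRp
      rcases hc with rfl | rfl <;> omega
    exact ⟨h0, hr, h2, by unfold maxCp; omega⟩
  rcases h with h | h
  · exact key c1 (Or.inl rfl) h
  · exact key c2 (Or.inr rfl) h

theorem ks_eq (c1 c2 : List (List String)) :
    PySem.List.sorted2 (Ukeys c1 c2) (fun p => p.1) (fun p => p.2) =
      (allPos c1 c2).filter (fun p => decide (p ∈ Ukeys c1 c2)) := by
  rw [sorted2_eq_sorted_lex]
  apply PySem.List.sorted_eq_of_perm_of_pairwise_lt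
  · apply (List.perm_ext_iff_of_nodup ?_ ?_).mpr
    · intro x
      simp only [List.mem_filter, decide_eq_true_eq]
      constructor
      · rintro ⟨_, h⟩; exact h
      · intro h
        exact ⟨inB_mem_allPos c1 c2 x ((mem_Ukeys c1 c2 x).mp h), h⟩
    · exact ((pairwise_allPos c1 c2).imp
        (fun h => by rintro rfl; exact lt_irrefl _ h)).filter _
    · exact PySem.Set.nodup_union _ _ (PySem.Set.nodup_ofList _)
  · exact (pairwise_allPos c1 c2).filter _

theorem val_eq (cells : List (List String)) (r c : Int) (hr : 0 ≤ r) (hc : 0 ≤ c) :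
    (if r < (cells.length : Int) ∧ c < ((PySem.List.pyGetD cells r []).length : Int)
     then PySem.List.pyGetD (PySem.List.pyGetD cells r []) c "" else "") = V cells (r, c) := by
  rw [PySem.List.pyGetD_of_nonneg cells [] hr]
  by_cases h : r < (cells.length : Int) ∧ c < ((cells.getD r.toNat []).length : Int)
  · rw [if_pos h, PySem.List.pyGetD_of_nonneg _ _ hc,
      getD_build_in cells (r, c) ⟨hr, h.1, hc, h.2⟩]
  · rw [if_neg h, getD_build_out cells (r, c) (fun hb => h ⟨hb.2.1, hb.2.2.2⟩)]

theorem diff_mem_U (c1 c2 : List (List String)) (p : Int × Int)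
    (h : V c1 p ≠ V c2 p) : p ∈ Ukeys c1 c2 := by
  rw [mem_Ukeys]
  by_contra hn
  rw [getD_build_out c1 p (fun h1 => hn (Or.inl h1)),
    getD_build_out c2 p (fun h2 => hn (Or.inr h2))] at h
  exact h rfl

theorem A_eq (c1 c2 : List (List String)) :
    cell_diffs_py c1 c2 =
      ((allPos c1 c2).filter (fun p => decide (V c1 p ≠ V c2 p))).map
        (fun p => (p.1, p.2, V c1 p, V c2 p)) := by
  simp only [cell_diffs_py, PySem.List.foldl_append_ite, PySem.List.foldl_append_eq_flatMap,
    List.nil_append]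
  unfold allPos
  rw [List.filter_flatMap, List.map_flatMap]
  refine List.flatMap_congr (fun r hrmem => ?_)
  have hr : 0 ≤ r := (PySem.List.mem_pyRange_one.mp hrmem).1
  rw [List.filter_map, List.map_map]
  rw [List.map_congr_left (g := fun c => ((r:Int), c, V c1 (r, c), V c2 (r, c))) ?hmap]
  case hmap =>
    intro c hcf
    have hc : 0 ≤ c := (PySem.List.mem_pyRange_one.mp (List.mem_of_mem_filter hcf)).1
    rw [val_eq c1 r c hr hc, val_eq c2 r c hr hc]
  congr 1
  refine List.filter_congr (fun c hcmem => ?_)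
  have hc : 0 ≤ c := (PySem.List.mem_pyRange_one.mp hcmem).1
  rw [val_eq c1 r c hr hc, val_eq c2 r c hr hc]
  rfl

theorem B_eq (c1 c2 : List (List String)) :
    cell_diffs_py_alt c1 c2 =
      (((allPos c1 c2).filter (fun p => decide (p ∈ Ukeys c1 c2))).filter
          (fun p => decide (V c1 p ≠ V c2 p))).map
        (fun p => (p.1, p.2, V c1 p, V c2 p)) := by
  simp only [cell_diffs_py_alt]
  rw [PySem.List.foldl_append_ite
    (p := fun pos => (buildMap c1).getD pos "" ≠ (buildMap c2).getD pos "")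
    (f := fun pos => (pos.1, pos.2, (buildMap c1).getD pos "", (buildMap c2).getD pos ""))]
  rw [List.nil_append, show PySem.List.sorted2
      (PySem.Set.union (PySem.Set.ofList (buildMap c1).keys) (buildMap c2).keys)
      (fun p => p.1) (fun p => p.2) =
    PySem.List.sorted2 (Ukeys c1 c2) (fun p => p.1) (fun p => p.2) from rfl, ks_eq]
  rfl

-- ===== VERDICT (by name: the statement is the Claim_ definition above) =====
theorem cell_diffs_py_spec : Claim_equal_cell_diffs_py := by
  intro c1 c2 _
  show cell_diffs_py c1 c2 = cell_diffs_py_alt c1 c2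
  rw [A_eq, B_eq, List.filter_filter]
  congr 1
  apply List.filter_congr
  intro p _
  by_cases h : V c1 p ≠ V c2 p
  · simp [h, diff_mem_U c1 c2 p h]
  · simp [h]
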